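-- pv_equiv track=rewrite | github.com/icrphysics/RSStaticCodeChecker | RSStaticCodeChecker/static_code_checker/generated/argument_change_1225.py | argumentsRight
-- ===== SOURCE A (Python) =====
-- def argumentsRight(d):
--     args = ["FractionExamination","PlanningExamination"]
--     too_many = []
--     for keyword in d.get("keywords", []):
--         if keyword.get("arg") in args:
--             args.remove(keyword.get("arg"))
--         else:
--             too_many.append(keyword.get("arg"))
--     if not too_many and not args:
--         return True
--     return (0 if too_many else 3)
-- ===== SOURCE B (Python) =====
-- def argumentsRight(d):
--     required = {"FractionExamination", "PlanningExamination"}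
--     vals = [kw.get("arg") for kw in d.get("keywords", [])]
--     present = required & set(vals)
--     if len(vals) != len(present):
--         return 0
--     return True if present == required else 3
-- ===== Notes on version B (the rewrite author's own statement) =====
-- stated objective: simpler
-- what changed: B replaces A's sequential loop that mutates a required-args list with remove/append by a single comprehension collecting all arg values, then a set-intersection plus two length/equality comparisons deciding 0 / 3 / True.
import Mathlib
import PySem

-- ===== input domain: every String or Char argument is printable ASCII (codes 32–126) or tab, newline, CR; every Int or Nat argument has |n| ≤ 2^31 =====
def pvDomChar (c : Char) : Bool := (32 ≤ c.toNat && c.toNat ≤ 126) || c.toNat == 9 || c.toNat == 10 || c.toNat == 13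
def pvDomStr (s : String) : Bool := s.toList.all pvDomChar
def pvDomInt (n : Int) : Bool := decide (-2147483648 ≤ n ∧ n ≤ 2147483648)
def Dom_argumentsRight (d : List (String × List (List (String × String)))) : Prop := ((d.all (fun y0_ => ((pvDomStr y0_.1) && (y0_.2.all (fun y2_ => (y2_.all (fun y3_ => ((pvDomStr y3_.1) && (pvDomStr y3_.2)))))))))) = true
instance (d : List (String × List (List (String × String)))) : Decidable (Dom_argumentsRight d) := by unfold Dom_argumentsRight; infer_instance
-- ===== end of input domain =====

-- B replaces A's sequential remove/append loop over a mutable required-args list by a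
-- one-pass collection of the arg values plus a set-intersection/length decision (objective: simpler).

-- ===== PORT A =====
-- the body of A's for-loop, on the state (args, too_many)
def pvAStep (st : List String × List (Option String)) (keyword : List (String × String)) :
    List String × List (Option String) :=
  match PySem.Dict.get? (PySem.Dict.mk keyword) "arg" with
  | some v =>
      if v ∈ st.1 then ((PySem.List.remove? st.1 v).getD st.1, st.2)
      else (st.1, st.2 ++ [some v])
  | none => (st.1, st.2 ++ [none])

def argumentsRight (d : List (String × List (List (String × String)))) : Int :=
  let st := (PySem.Dict.getD (PySem.Dict.mk d) "keywords" []).foldl pvAStep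
      (["FractionExamination", "PlanningExamination"], [])
  if st.2 = [] ∧ st.1 = [] then 1
  else if ¬ st.2 = [] then 0 else 3

-- ===== PORT B =====
def argumentsRight_alt (d : List (String × List (List (String × String)))) : Int :=
  let required : PySem.Set (Option String) :=
    PySem.Set.ofList [some "FractionExamination", some "PlanningExamination"]
  let vals := (PySem.Dict.getD (PySem.Dict.mk d) "keywords" []).map
      (fun kw => PySem.Dict.get? (PySem.Dict.mk kw) "arg")
  let present := PySem.Set.inter required (PySem.Set.ofList vals)
  if vals.length ≠ present.length then 0
  else if PySem.Set.equal present required then 1 else 3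

-- ===== PRECONDITION & SPEC =====
def Spec_argumentsRight (d : List (String × List (List (String × String)))) (out : Int) : Prop := out = argumentsRight_alt d
instance (d : List (String × List (List (String × String)))) (out : Int) : Decidable (Spec_argumentsRight d out) := by unfold Spec_argumentsRight; infer_instance

-- ===== CLAIM (what is proved, stated in full; the proofs are below) =====
def Claim_equal_argumentsRight : Prop := ∀ (d : List (String × List (List (String × String)))), Dom_argumentsRight d → Spec_argumentsRight d (argumentsRight d)

-- ===== LEMMAS AND PROOFS =====

-- the arg value of one keyword dict
def pvVal (kw : List (String × String)) : Option String :=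
  PySem.Dict.get? (PySem.Dict.mk kw) "arg"

-- invariant of A's loop: the surviving args are those whose value never occurs among the
-- keywords' values, and each keyword either consumed an arg or landed in too_many
theorem pvA_loop (kws : List (List (String × String))) :
    ∀ (args : List String) (tm : List (Option String)), args.Nodup →
      (kws.foldl pvAStep (args, tm)).1
        = args.filter (fun a => !((kws.map pvVal).contains (some a)))
      ∧ (kws.foldl pvAStep (args, tm)).2.length + args.length
        = tm.length + kws.length + (kws.foldl pvAStep (args, tm)).1.length := by
  induction kws with
  | nil => intro args tm _; simp
  | cons k kws ih =>
    intro args tm hnd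
    have hstep : pvAStep (args, tm) k =
        match pvVal k with
        | some v => if v ∈ args then ((PySem.List.remove? args v).getD args, tm)
                    else (args, tm ++ [some v])
        | none => (args, tm ++ [none]) := rfl
    simp only [List.foldl_cons, hstep]
    cases hv : pvVal k with
    | none =>
      obtain ⟨h1, h2⟩ := ih args (tm ++ [none]) hnd
      refine ⟨?_, ?_⟩
      · rw [h1]
        refine List.filter_congr (fun a _ => ?_)
        simp [hv]
      · simp only [List.length_append, List.length_cons, List.length_nil] at h2 ⊢
        omega
    | some v =>
      by_cases hmem : v ∈ args
      · simp only [if_pos hmem, PySem.List.remove?_eq_some_erase args v hmem, Option.getD_some]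
        obtain ⟨h1, h2⟩ := ih (args.erase v) tm (hnd.erase v)
        have hfilt : (args.erase v).filter (fun a => !((kws.map pvVal).contains (some a)))
            = args.filter (fun a => !(((k :: kws).map pvVal).contains (some a))) := by
          rw [hnd.erase_eq_filter v, List.filter_filter]
          refine List.filter_congr (fun a _ => ?_)
          simp only [List.map_cons, hv, List.contains_cons, Bool.not_or]
          by_cases hav : a = v <;>
            cases hp : decide (∃ a_1 ∈ kws, pvVal a_1 = some a) <;> simp [hav, hp, bne]
        have hlen : (args.erase v).length + 1 = args.length :=
          List.length_erase_add_one hmem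
        refine ⟨by rw [h1, hfilt], ?_⟩
        rw [h1, hfilt] at h2 ⊢
        simp only [List.length_cons] at h2 ⊢
        omega
      · simp only [if_neg hmem]
        obtain ⟨h1, h2⟩ := ih args (tm ++ [some v]) hnd
        have hfilt : args.filter (fun a => !((kws.map pvVal).contains (some a)))
            = args.filter (fun a => !(((k :: kws).map pvVal).contains (some a))) := by
          refine List.filter_congr (fun a ha => ?_)
          have : a ≠ v := fun h => hmem (h ▸ ha)
          simp [hv, this]
        refine ⟨by rw [h1, hfilt], ?_⟩
        simp only [List.length_append, List.length_cons, List.length_nil] at h2 ⊢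
        omega

-- ===== VERDICT (by name: the statement is the Claim_ definition above) =====
theorem argumentsRight_spec : Claim_equal_argumentsRight := by
  intro d _
  unfold Spec_argumentsRight argumentsRight argumentsRight_alt
  have hfn : (fun (kw : List (String × String)) => PySem.Dict.get? (PySem.Dict.mk kw) "arg") = pvVal := rfl
  simp only [hfn]
  set kws := PySem.Dict.getD (PySem.Dict.mk d) "keywords" [] with hkws
  set vals := kws.map pvVal with hvals
  set X := List.foldl pvAStep (["FractionExamination", "PlanningExamination"], []) kws with hX
  obtain ⟨h1, h2⟩ := pvA_loop kws ["FractionExamination", "PlanningExamination"] [] (by decide)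
  rw [← hX] at h1 h2
  rw [← hvals] at h1
  have hn : vals.length = kws.length := by rw [hvals]; simp
  have hofl : PySem.Set.ofList [some "FractionExamination", some "PlanningExamination"]
      = [some "FractionExamination", some "PlanningExamination"] := by decide
  have hc : ∀ x : Option String,
      PySem.Set.contains (PySem.Set.ofList vals) x = vals.contains x := by
    intro x
    rw [Bool.eq_iff_iff, PySem.Set.contains_iff, PySem.Set.mem_ofList]
    simp
  simp only [hofl, PySem.Set.inter, hc]
  by_cases hF : some "FractionExamination" ∈ vals <;>
    by_cases hP : some "PlanningExamination" ∈ vals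
  · -- both required values occur
    have hres1 : X.1 = [] := by rw [h1]; simp [hF, hP]
    have hpres : List.filter (fun x => vals.contains x)
        [some "FractionExamination", some "PlanningExamination"]
        = [some "FractionExamination", some "PlanningExamination"] := by simp [hF, hP]
    have h2n : 2 ≤ vals.length := by
      have hs : [some "FractionExamination", some "PlanningExamination"] ⊆ vals := by
        intro x hx; simp at hx; rcases hx with rfl | rfl <;> assumption
      have := (List.subperm_of_subset (by decide) hs).length_le
      simpa using this
    rw [hres1] at h2
    simp only [List.length_cons, List.length_nil] at h2
    have hlen : X.2.length + 2 = vals.length := by omega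
    rw [hres1, hpres]
    by_cases h2' : vals.length = 2
    · have hX2 : X.2 = [] := List.length_eq_zero_iff.mp (by omega)
      simp [hX2, h2']
    · have hX2 : X.2 ≠ [] := by
        intro h; rw [h] at hlen; simp at hlen; omega
      simp [hX2, h2']
  · -- only FractionExamination occurs
    have hres1 : X.1 = ["PlanningExamination"] := by rw [h1]; simp [hF, hP]
    have hpres : List.filter (fun x => vals.contains x)
        [some "FractionExamination", some "PlanningExamination"]
        = [some "FractionExamination"] := by simp [hF, hP]
    have h1n : 1 ≤ vals.length := List.length_pos_of_mem hF
    rw [hres1] at h2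
    simp only [List.length_cons, List.length_nil] at h2
    have hlen : X.2.length + 1 = vals.length := by omega
    rw [hres1, hpres]
    by_cases h2' : vals.length = 1
    · have hX2 : X.2 = [] := List.length_eq_zero_iff.mp (by omega)
      simp [hX2, h2']
    · have hX2 : X.2 ≠ [] := by
        intro h; rw [h] at hlen; simp at hlen; omega
      simp [hX2, h2']
  · -- only PlanningExamination occurs
    have hres1 : X.1 = ["FractionExamination"] := by rw [h1]; simp [hF, hP]
    have hpres : List.filter (fun x => vals.contains x)
        [some "FractionExamination", some "PlanningExamination"]
        = [some "PlanningExamination"] := by simp [hF, hP]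
    have h1n : 1 ≤ vals.length := List.length_pos_of_mem hP
    rw [hres1] at h2
    simp only [List.length_cons, List.length_nil] at h2
    have hlen : X.2.length + 1 = vals.length := by omega
    rw [hres1, hpres]
    by_cases h2' : vals.length = 1
    · have hX2 : X.2 = [] := List.length_eq_zero_iff.mp (by omega)
      simp [hX2, h2']
    · have hX2 : X.2 ≠ [] := by
        intro h; rw [h] at hlen; simp at hlen; omega
      simp [hX2, h2']
  · -- neither occurs
    have hres1 : X.1 = ["FractionExamination", "PlanningExamination"] := by
      rw [h1]; simp [hF, hP]
    have hpres : List.filter (fun x => vals.contains x)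
        [some "FractionExamination", some "PlanningExamination"] = [] := by simp [hF, hP]
    rw [hres1] at h2
    simp only [List.length_cons, List.length_nil] at h2
    have hlen : X.2.length = vals.length := by omega
    rw [hres1, hpres]
    by_cases h2' : vals.length = 0
    · have hX2 : X.2 = [] := List.length_eq_zero_iff.mp (by omega)
      simp [hX2, h2']
      exact ⟨some "PlanningExamination", fun _ => rfl⟩
    · have hX2 : X.2 ≠ [] := by
        intro h; rw [h] at hlen; simp at hlen; omega
      simp [hX2, h2']
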